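-- pv_equiv track=rewrite | github.com/ApexIQ/skillsmith | src/skillsmith/commands/profile.py | _split_csv_values
-- ===== SOURCE A (Python) =====
-- def _split_csv_values(values: tuple[str, ...]) -> list[str]:
--     items: list[str] = []
--     for value in values:
--         for part in str(value).split(","):
--             part = part.strip()
--             if part:
--                 items.append(part)
--     return list(dict.fromkeys(items))
-- ===== SOURCE B (Python) =====
-- def _dedup_dc(seq):
--     # Divide and conquer: dedupe each half recursively, then merge by keeping the
--     # left half's result and appending the right half's survivors not in the left.
--     if len(seq) <= 1:
--         return list(seq)
--     mid = len(seq) // 2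
--     left = _dedup_dc(seq[:mid])
--     right = _dedup_dc(seq[mid:])
--     in_left = set(left)
--     return left + [p for p in right if p not in in_left]
--
--
-- def _split_csv_values(values):
--     parts = []
--     for value in values:
--         for part in str(value).split(","):
--             part = part.strip()
--             if part:
--                 parts.append(part)
--     return _dedup_dc(parts)
-- ===== Notes on version B (the rewrite author's own statement) =====
-- stated objective: alternative
-- what changed: A dedupes the flattened parts with a single dict.fromkeys pass; B dedupes them by recursive divide and conquer: split the parts list in half, dedupe each half recursively, and merge as left ++ (right's survivors not in left).
import Mathlib
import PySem

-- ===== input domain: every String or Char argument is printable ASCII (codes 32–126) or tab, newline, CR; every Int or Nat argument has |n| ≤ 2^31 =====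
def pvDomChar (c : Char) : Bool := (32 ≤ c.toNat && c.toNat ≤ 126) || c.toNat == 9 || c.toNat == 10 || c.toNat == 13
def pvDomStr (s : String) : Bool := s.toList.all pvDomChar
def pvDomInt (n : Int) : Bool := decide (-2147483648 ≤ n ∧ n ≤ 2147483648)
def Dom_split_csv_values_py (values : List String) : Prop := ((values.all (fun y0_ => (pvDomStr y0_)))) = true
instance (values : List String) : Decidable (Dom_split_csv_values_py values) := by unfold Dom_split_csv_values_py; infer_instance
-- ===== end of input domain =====

-- B replaces A's dict.fromkeys dedup pass by a recursive divide-and-conquer dedup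
-- (dedupe each half, merge as left ++ right-minus-left) over the flattened parts
-- (objective: alternative algorithm, same result).

-- ===== PORT A =====
-- value.split(",") with the non-empty literal separator never raises, so split? is always `some`
def split_csv_values_py (values : List String) : List String :=
  let items : List String := values.foldl (fun items value =>
    ((PySem.Str.split? value ",").getD []).foldl (fun items part =>
      let part := PySem.Str.strip part
      if part ≠ "" then items ++ [part] else items) items) []
  PySem.List.dedup items

-- ===== PORT B =====
-- Divide-and-conquer dedup: recurse on the two halves, then merge left ++ (right minus left).
def dedupDC (seq : List String) : List String :=
  if _h : seq.length ≤ 1 then seq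
  else
    let mid : Int := PySem.Int.floordiv (seq.length : Int) 2
    let left := dedupDC (PySem.List.slice seq none (some mid))
    let right := dedupDC (PySem.List.slice seq (some mid) none)
    let inLeft := PySem.Set.ofList left
    left ++ right.filter (fun p => p ∉ inLeft)
  termination_by seq.length
  decreasing_by
  · rw [show PySem.Int.floordiv (seq.length : Int) 2 = ((seq.length / 2 : Nat) : Int) from by
      simp [PySem.Int.floordiv, Int.fdiv_eq_ediv],
      PySem.List.slice_to_natCast]
    simp only [List.length_take]
    omega
  · rw [show PySem.Int.floordiv (seq.length : Int) 2 = ((seq.length / 2 : Nat) : Int) from by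
      simp [PySem.Int.floordiv, Int.fdiv_eq_ediv],
      PySem.List.slice_from_natCast]
    simp only [List.length_drop]
    omega

def split_csv_values_py_alt (values : List String) : List String :=
  let parts : List String := values.foldl (fun parts value =>
    ((PySem.Str.split? value ",").getD []).foldl (fun parts part =>
      let part := PySem.Str.strip part
      if part ≠ "" then parts ++ [part] else parts) parts) []
  dedupDC parts

-- ===== PRECONDITION & SPEC =====
def Spec_split_csv_values_py (values : List String) (out : List String) : Prop := out = split_csv_values_py_alt values
instance (values : List String) (out : List String) : Decidable (Spec_split_csv_values_py values out) := by unfold Spec_split_csv_values_py; infer_instance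

-- ===== CLAIM (what is proved, stated in full; the proofs are below) =====
def Claim_equal_split_csv_values_py : Prop := ∀ (values : List String), Dom_split_csv_values_py values → Spec_split_csv_values_py values (split_csv_values_py values)

-- ===== LEMMAS AND PROOFS =====

/-- Strip-and-drop-empties pass over the raw split parts. -/
def procS (parts : List String) : List String :=
  (parts.map PySem.Str.strip).filter (fun p => p ≠ "")

/-- The stripped, non-empty parts of one value. -/
def partsOf (v : String) : List String := procS ((PySem.Str.split? v ",").getD [])

theorem innerA (parts items : List String) :
    parts.foldl (fun items part =>
      let part := PySem.Str.strip part
      if part ≠ "" then items ++ [part] else items) items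
    = items ++ procS parts := by
  have hfun : (fun (items : List String) part =>
      let part := PySem.Str.strip part
      if part ≠ "" then items ++ [part] else items)
      = (fun acc x => if (fun x => decide (PySem.Str.strip x ≠ "")) x = true
          then acc ++ [PySem.Str.strip x] else acc) := by
    funext acc x; by_cases h : PySem.Str.strip x = "" <;> simp [h]
  rw [hfun, PySem.List.foldl_append_if]
  rw [procS, List.filter_map]
  rfl

theorem A_eq (values : List String) :
    split_csv_values_py values = PySem.Set.ofList (values.flatMap partsOf) := by
  unfold split_csv_values_py
  simp only [innerA, PySem.List.foldl_append_eq_flatMap, List.nil_append,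
    PySem.List.dedup_eq_ofList]
  rfl

theorem dedupDC_eq (seq : List String) : dedupDC seq = PySem.Set.ofList seq := by
  induction seq using dedupDC.induct with
  | case1 seq h =>
    rw [dedupDC, dif_pos h]
    match seq, h with
    | [], _ => rfl
    | [x], _ => rfl
  | case2 seq h mid hl hr =>
    rw [dedupDC, dif_neg h]
    simp only
    rw [hl, hr]
    have hmid : mid = ((seq.length / 2 : Nat) : Int) := by
      show PySem.Int.floordiv (seq.length : Int) 2 = ((seq.length / 2 : Nat) : Int)
      unfold PySem.Int.floordiv
      rw [Int.fdiv_eq_ediv]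
      simp
    rw [hmid, PySem.List.slice_to_natCast, PySem.List.slice_from_natCast]
    conv_rhs => rw [show seq = seq.take (seq.length / 2) ++ seq.drop (seq.length / 2) from
      (List.take_append_drop _ _).symm]
    rw [PySem.Set.ofList_append, PySem.Set.update_eq_append_filter]
    congr 1
    apply List.filter_congr
    intro x _
    simp

-- ===== VERDICT (by name: the statement is the Claim_ definition above) =====
theorem split_csv_values_py_spec : Claim_equal_split_csv_values_py := by
  intro values _
  unfold Spec_split_csv_values_py
  unfold split_csv_values_py_alt
  rw [A_eq]
  simp only [innerA, PySem.List.foldl_append_eq_flatMap, List.nil_append, dedupDC_eq]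
  rfl
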